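-- pv_equiv track=rewrite | github.com/seeligto/hexo_rl | scripts/mcts_depth_probe.py | zoi_count
-- ===== SOURCE A (Python) =====
-- from typing import List, Tuple
--
-- def hex_dist(q1: int, r1: int, q2: int, r2: int) -> int:
--     dq, dr = q1 - q2, r1 - r2
--     return (abs(dq) + abs(dr) + abs(dq + dr)) // 2
--
-- def zoi_count(
--     legal: List[Tuple[int, int]],
--     move_history: List[Tuple[int, int]],
--     margin: int = 5,
--     lookback: int = 16,
-- ) -> int:
--     """Count legal moves inside ZOI radius of recent moves (mirrors game_runner.rs:631-643)."""
--     if len(move_history) < 3: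
--         return len(legal)
--     anchors = move_history[-lookback:]
--     filtered = [
--         (q, r) for (q, r) in legal
--         if any(hex_dist(q, r, q0, r0) <= margin for (q0, r0) in anchors)
--     ]
--     return len(filtered) if len(filtered) >= 3 else len(legal)
-- ===== SOURCE B (Python) =====
-- def zoi_count(legal, move_history, margin=5, lookback=16):
--     if len(move_history) < 3:
--         return len(legal)
--     # shrink a pool of not-yet-covered cells, one anchor at a time
--     remaining = list(legal)
--     for (q0, r0) in move_history[-lookback:]:
--         remaining = [
--             (q, r) for (q, r) in remaining
--             if max(abs(q - q0), abs(r - r0), abs(q - q0 + r - r0)) > margin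
--         ]
--     cnt = len(legal) - len(remaining)
--     return cnt if cnt >= 3 else len(legal)
-- ===== Notes on version B (the rewrite author's own statement) =====
-- stated objective: alternative
-- what changed: Instead of building the filtered list with a per-cell any() scan over anchors and a floor-division hex distance, B iterates anchors outermost and shrinks a pool of not-yet-covered cells, testing coverage with the closed-form max-of-abs characterisation of hex distance; the count is len(legal) minus the surviving pool.
import Mathlib
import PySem

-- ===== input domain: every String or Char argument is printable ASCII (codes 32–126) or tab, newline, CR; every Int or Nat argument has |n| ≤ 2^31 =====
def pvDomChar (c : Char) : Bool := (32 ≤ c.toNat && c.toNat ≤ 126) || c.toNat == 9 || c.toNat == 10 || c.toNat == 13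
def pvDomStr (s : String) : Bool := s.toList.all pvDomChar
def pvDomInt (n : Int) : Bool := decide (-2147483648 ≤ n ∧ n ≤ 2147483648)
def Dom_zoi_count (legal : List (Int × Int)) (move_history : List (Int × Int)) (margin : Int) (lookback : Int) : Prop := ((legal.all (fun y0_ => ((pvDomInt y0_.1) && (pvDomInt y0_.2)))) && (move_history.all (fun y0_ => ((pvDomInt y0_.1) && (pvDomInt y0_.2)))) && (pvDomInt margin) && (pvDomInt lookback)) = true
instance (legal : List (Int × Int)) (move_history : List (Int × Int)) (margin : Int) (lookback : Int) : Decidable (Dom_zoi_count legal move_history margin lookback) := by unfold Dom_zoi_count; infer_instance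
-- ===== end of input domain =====

-- B replaces A's per-cell any()-over-anchors filter by an anchor-outermost shrinking pool with a
-- max-of-abs distance test (objective: alternative; same asymptotic cost).

-- ===== PORT A =====
def hexDist (q1 r1 q2 r2 : Int) : Int :=
  let dq := q1 - q2
  let dr := r1 - r2
  PySem.Int.floordiv (|dq| + |dr| + |dq + dr|) 2

def zoi_count (legal : List (Int × Int)) (move_history : List (Int × Int)) (margin : Int) (lookback : Int) : Int :=
  if move_history.length < 3 then (legal.length : Int)
  else
    let anchors := PySem.List.slice move_history (some (-lookback)) none
    let filtered := legal.filter (fun c => anchors.any (fun a => decide (hexDist c.1 c.2 a.1 a.2 ≤ margin)))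
    if (filtered.length : Int) ≥ 3 then (filtered.length : Int) else (legal.length : Int)

-- ===== PORT B =====
def farFrom (margin : Int) (c a : Int × Int) : Bool :=
  decide (margin < max (max |c.1 - a.1| |c.2 - a.2|) |c.1 - a.1 + (c.2 - a.2)|)

def zoi_count_alt (legal : List (Int × Int)) (move_history : List (Int × Int)) (margin : Int) (lookback : Int) : Int :=
  if move_history.length < 3 then (legal.length : Int)
  else
    let anchors := PySem.List.slice move_history (some (-lookback)) none
    let remaining := anchors.foldl (fun rem a => rem.filter (fun c => farFrom margin c a)) legal
    let cnt : Int := (legal.length : Int) - (remaining.length : Int)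
    if cnt ≥ 3 then cnt else (legal.length : Int)

-- ===== PRECONDITION & SPEC =====
def Spec_zoi_count (legal : List (Int × Int)) (move_history : List (Int × Int)) (margin : Int) (lookback : Int) (out : Int) : Prop := out = zoi_count_alt legal move_history margin lookback
instance (legal : List (Int × Int)) (move_history : List (Int × Int)) (margin : Int) (lookback : Int) (out : Int) : Decidable (Spec_zoi_count legal move_history margin lookback out) := by unfold Spec_zoi_count; infer_instance

-- ===== CLAIM (what is proved, stated in full; the proofs are below) =====
def Claim_equal_zoi_count : Prop := ∀ (legal : List (Int × Int)) (move_history : List (Int × Int)) (margin : Int) (lookback : Int), Dom_zoi_count legal move_history margin lookback → Spec_zoi_count legal move_history margin lookback (zoi_count legal move_history margin lookback)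

-- ===== LEMMAS AND PROOFS =====

-- "far" is the boolean negation of A's distance test ("near")
theorem farFrom_eq_not_near (m : Int) (c a : Int × Int) :
    farFrom m c a = !(decide (hexDist c.1 c.2 a.1 a.2 ≤ m)) := by
  have hsum : |c.1 - a.1| + |c.2 - a.2| + |c.1 - a.1 + (c.2 - a.2)| =
      2 * max (max |c.1 - a.1| |c.2 - a.2|) |c.1 - a.1 + (c.2 - a.2)| := by
    rcases abs_cases (c.1 - a.1) with ⟨h1, _⟩ | ⟨h1, _⟩ <;>
      rcases abs_cases (c.2 - a.2) with ⟨h2, _⟩ | ⟨h2, _⟩ <;>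
      rcases abs_cases (c.1 - a.1 + (c.2 - a.2)) with ⟨h3, _⟩ | ⟨h3, _⟩ <;>
      simp [max_def] <;> split_ifs <;> omega
  have hdist : hexDist c.1 c.2 a.1 a.2 =
      max (max |c.1 - a.1| |c.2 - a.2|) |c.1 - a.1 + (c.2 - a.2)| := by
    unfold hexDist
    dsimp only
    rw [hsum, PySem.Int.floordiv_eq_ediv_of_pos (by omega)]
    omega
  unfold farFrom
  rw [show (decide (hexDist c.1 c.2 a.1 a.2 ≤ m)) = decide (max (max |c.1 - a.1| |c.2 - a.2|) |c.1 - a.1 + (c.2 - a.2)| ≤ m) from by rw [hdist]]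
  rw [← decide_not]
  exact decide_eq_decide.mpr (by omega)

-- folding filters over the anchors = one filter by "far from every anchor"
theorem foldl_filter_eq_filter_all (m : Int) :
    ∀ (as l : List (Int × Int)),
      as.foldl (fun rem a => rem.filter (fun c => farFrom m c a)) l
        = l.filter (fun c => as.all (fun a => farFrom m c a)) := by
  intro as
  induction as with
  | nil => intro l; simp
  | cons a as ih =>
      intro l
      simp only [List.foldl_cons, ih, List.filter_filter, List.all_cons]
      exact List.filter_congr (fun c _ => by rw [Bool.and_comm])

theorem length_filter_not_add {α : Type} (p : α → Bool) (l : List α) :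
    (l.filter (fun x => !p x)).length + (l.filter p).length = l.length := by
  induction l with
  | nil => simp
  | cons x xs ih =>
      by_cases h : p x = true <;> simp [h, ← ih] <;> omega

-- ===== VERDICT (by name: the statement is the Claim_ definition above) =====
theorem zoi_count_spec : Claim_equal_zoi_count := by
  intro legal mh margin lookback _
  unfold Spec_zoi_count zoi_count zoi_count_alt
  by_cases hlen : mh.length < 3
  · simp [hlen]
  · simp only [hlen, if_false]
    set anchors := PySem.List.slice mh (some (-lookback)) none with hanch
    have hfar : ∀ c : Int × Int,
        (anchors.all (fun a => farFrom margin c a))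
          = !(anchors.any (fun a => decide (hexDist c.1 c.2 a.1 a.2 ≤ margin))) := by
      intro c
      rw [List.all_eq_not_any_not]
      congr 1
      simp only [farFrom_eq_not_near, Bool.not_not]
    rw [foldl_filter_eq_filter_all]
    rw [List.filter_congr (fun c _ => hfar c)]
    have hcount := length_filter_not_add
      (fun c : Int × Int => anchors.any (fun a => decide (hexDist c.1 c.2 a.1 a.2 ≤ margin))) legal
    omega
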